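-- pv_equiv track=rewrite | github.com/Claudiu-COSTEA/Licenta | apis/users/referee/postFights/lambda_function.py | round_for_n
-- ===== SOURCE A (Python) =====
-- def round_for_n(n: int) -> str:
--     if n <= 2:
--         return "Final"
--     p = 1
--     while p < n:
--         p *= 2
--     size = max(p // 2, 2)
--     return "Round 2" if size == 2 else f"Round {size}"
-- ===== SOURCE B (Python) =====
-- def round_for_n(n: int) -> str:
--     if n <= 2:
--         return "Final"
--     p = 1 << (n - 1).bit_length()
--     size = max(p // 2, 2)
--     return f"Round {size}"
-- ===== Notes on version B (the rewrite author's own statement) =====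
-- stated objective: idiomatic
-- what changed: Replaces the doubling while-loop with a closed-form bracket size via (n-1).bit_length() and folds the redundant special-case branch into a single f-string return.
import Mathlib
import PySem

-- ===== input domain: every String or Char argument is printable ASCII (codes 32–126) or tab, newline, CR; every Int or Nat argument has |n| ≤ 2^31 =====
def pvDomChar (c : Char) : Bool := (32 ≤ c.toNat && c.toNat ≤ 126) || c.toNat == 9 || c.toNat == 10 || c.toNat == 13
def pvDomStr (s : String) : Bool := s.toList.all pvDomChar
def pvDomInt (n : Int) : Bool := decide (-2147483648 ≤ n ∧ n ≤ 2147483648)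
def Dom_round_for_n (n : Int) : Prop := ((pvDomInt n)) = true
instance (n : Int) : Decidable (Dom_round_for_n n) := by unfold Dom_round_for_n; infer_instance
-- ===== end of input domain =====

-- B replaces A's doubling while-loop by the closed form 1 <<< (n-1).bit_length() (idiomatic; same return value).

-- ===== PORT A =====
-- the 'while p < n: p *= 2' loop; the 0 < p guard only makes the recursion total
-- (the loop is entered with p = 1, where the guard always holds)
def roundLoopA (n p : Int) : Int :=
  if h : 0 < p ∧ p < n then roundLoopA n (2 * p) else p
termination_by (n - p).toNat
decreasing_by omega

def round_for_n (n : Int) : String :=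
  if n ≤ 2 then "Final"
  else
    let p := roundLoopA n 1
    let size := max (PySem.Int.floordiv p 2) 2
    if size = 2 then "Round 2" else "Round " ++ PySem.Int.toStr size

-- ===== PORT B =====
-- (n-1).bit_length() for n ≥ 3 (so n-1 ≥ 2 > 0): bit_length m = log2 m + 1
def round_for_n_alt (n : Int) : String :=
  if n ≤ 2 then "Final"
  else
    let p : Int := 1 <<< (Nat.log2 (n - 1).toNat + 1)
    let size := max (PySem.Int.floordiv p 2) 2
    "Round " ++ PySem.Int.toStr size

-- ===== PRECONDITION & SPEC =====
def Spec_round_for_n (n : Int) (out : String) : Prop := out = round_for_n_alt n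
instance (n : Int) (out : String) : Decidable (Spec_round_for_n n out) := by unfold Spec_round_for_n; infer_instance

-- ===== CLAIM (what is proved, stated in full; the proofs are below) =====
def Claim_equal_round_for_n : Prop := ∀ (n : Int), Dom_round_for_n n → Spec_round_for_n n (round_for_n n)

-- ===== LEMMAS AND PROOFS =====

-- the loop, started at a power of two below n, stops at 2^(log2(n-1)+1)
theorem roundLoopA_pow (n : Int) (hn : 3 ≤ n) :
    ∀ (k : ℕ), (2:Int)^k < n → roundLoopA n ((2:Int)^k) = 2 ^ (Nat.log2 (n - 1).toNat + 1) := by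
  have hL : ∀ k : ℕ, (2:Int)^k < n → k < Nat.log2 (n - 1).toNat + 1 := by
    intro k hk
    have h1 : (2:Int)^k ≤ n - 1 := by omega
    have h2 : (2:ℕ)^k ≤ (n - 1).toNat := by
      have : ((2:ℕ)^k : Int) = (2:Int)^k := by push_cast; ring
      omega
    have hk' : k ≤ Nat.log2 (n - 1).toNat := by
      rw [Nat.log2_eq_log_two]
      exact Nat.le_log_of_pow_le (by norm_num) h2
    omega
  intro k hk
  have hb := hL k hk
  -- induct on the gap to the final exponent
  have main : ∀ (d k : ℕ), Nat.log2 (n - 1).toNat + 1 - k ≤ d → (2:Int)^k < n →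
      roundLoopA n ((2:Int)^k) = 2 ^ (Nat.log2 (n - 1).toNat + 1) := by
    intro d
    induction d with
    | zero =>
      intro k hd hk
      exact absurd (hL k hk) (by omega)
    | succ d ih =>
      intro k _ hk
      have hpos : (0:Int) < 2^k := by positivity
      rw [roundLoopA]
      rw [dif_pos ⟨hpos, hk⟩]
      have h2k : (2:Int) * 2^k = 2^(k+1) := by ring
      by_cases hnext : (2:Int)^(k+1) < n
      · rw [h2k]
        exact ih (k+1) (by have := hL (k+1) hnext; omega) hnext
      · -- the loop stops at 2^(k+1); show log2 (n-1) = k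
        rw [h2k, roundLoopA, dif_neg (by push Not; intro _; omega)]
        have h1 : (2:ℕ)^k ≤ (n - 1).toNat := by
          have : ((2:ℕ)^k : Int) = (2:Int)^k := by push_cast; ring
          omega
        have h2 : (n - 1).toNat < (2:ℕ)^(k+1) := by
          have : ((2:ℕ)^(k+1) : Int) = (2:Int)^(k+1) := by push_cast; ring
          omega
        have hlog : Nat.log2 (n - 1).toNat = k := by
          rw [Nat.log2_eq_log_two]
          exact Nat.log_eq_of_pow_le_of_lt_pow h1 h2
        rw [hlog]
  exact main (Nat.log2 (n - 1).toNat + 1) k (by omega) hk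

-- ===== VERDICT (by name: the statement is the Claim_ definition above) =====
theorem round_for_n_spec : Claim_equal_round_for_n := by
  intro n _
  unfold Spec_round_for_n round_for_n round_for_n_alt
  by_cases h : n ≤ 2
  · simp [h]
  · have hn : 3 ≤ n := by omega
    simp only [if_neg h]
    have h1 : roundLoopA n 1 = 2 ^ (Nat.log2 (n - 1).toNat + 1) := by
      have := roundLoopA_pow n hn 0 (by norm_num; omega)
      simpa using this
    set L := Nat.log2 (n - 1).toNat + 1 with hLdef
    have hshift : (((1 <<< L : ℕ) : Int)) = 2 ^ L := by
      push_cast [Nat.shiftLeft_eq]; ring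
    rw [h1, hshift]
    -- both sides now share p = 2^L and size
    set size := max (PySem.Int.floordiv ((2:Int)^L) 2) 2 with hs
    by_cases hsz : size = 2
    · rw [if_pos hsz, hsz]; rfl
    · rw [if_neg hsz]
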